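-- pv_equiv track=rewrite | github.com/Quinny-dev/Echo-Me | NLP/Rulebased-Temporal.py | detect_tense_and_aspect
-- ===== SOURCE A (Python) =====
-- from typing import List, Dict, Tuple, Optional
--
-- def detect_tense_and_aspect(signs: List[str]) -> Tuple[str, str, List[str]]:
--     """Enhanced tense and aspect detection"""
--     tense = 'present'
--     aspect = 'simple'  # simple, progressive, perfect
--     cleaned_signs = []
--
--     temporal_markers = {
--         'past': ['YESTERDAY', 'BEFORE', 'PAST', 'FINISH', 'DONE'],
--         'future': ['TOMORROW', 'WILL', 'FUTURE', 'LATER'],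
--         'present': ['NOW', 'TODAY']
--     }
--
--     for sign in signs:
--         is_temporal = False
--         for tense_type, markers in temporal_markers.items():
--             if sign in markers:
--                 if sign == 'FINISH':
--                     aspect = 'perfect'
--                 tense = tense_type
--                 is_temporal = True
--                 if sign not in ['NOW', 'TODAY']:  # Keep present markers
--                     break
--
--         if not is_temporal or sign in ['NOW', 'TODAY']:
--             cleaned_signs.append(sign)
--
--     return tense, aspect, cleaned_signs
-- ===== SOURCE B (Python) =====
-- from typing import List, Tuple
--
-- TENSES = [
--     ('past', ('YESTERDAY', 'BEFORE', 'PAST', 'FINISH', 'DONE')),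
--     ('future', ('TOMORROW', 'WILL', 'FUTURE', 'LATER')),
--     ('present', ('NOW', 'TODAY')),
-- ]
-- # every marker except the present ones (NOW/TODAY are kept in the cleaned output)
-- REMOVAL = frozenset(m for t, ms in TENSES for m in ms if t != 'present')
--
-- def _last_tense(signs: List[str]) -> str:
--     # search backwards and stop at the first temporal marker found
--     for s in reversed(signs):
--         for tense, markers in TENSES:
--             if s in markers:
--                 return tense
--     return 'present'
--
-- def detect_tense_and_aspect(signs: List[str]) -> Tuple[str, str, List[str]]:
--     tense = _last_tense(signs)
--     aspect = 'perfect' if 'FINISH' in signs else 'simple'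
--     cleaned_signs = [s for s in signs if s not in REMOVAL]
--     return tense, aspect, cleaned_signs
-- ===== Notes on version B (the rewrite author's own statement) =====
-- stated objective: simpler
-- what changed: Instead of A's forward loop threading tense/aspect/is_temporal state through a nested category scan with break, B computes the three results independently: tense by a backward search over reversed(signs) that early-returns at the first temporal marker found (last marker wins by construction, no accumulator), aspect by a single 'FINISH' membership test, and cleaned_signs by a filter against a removal set.
import Mathlib
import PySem

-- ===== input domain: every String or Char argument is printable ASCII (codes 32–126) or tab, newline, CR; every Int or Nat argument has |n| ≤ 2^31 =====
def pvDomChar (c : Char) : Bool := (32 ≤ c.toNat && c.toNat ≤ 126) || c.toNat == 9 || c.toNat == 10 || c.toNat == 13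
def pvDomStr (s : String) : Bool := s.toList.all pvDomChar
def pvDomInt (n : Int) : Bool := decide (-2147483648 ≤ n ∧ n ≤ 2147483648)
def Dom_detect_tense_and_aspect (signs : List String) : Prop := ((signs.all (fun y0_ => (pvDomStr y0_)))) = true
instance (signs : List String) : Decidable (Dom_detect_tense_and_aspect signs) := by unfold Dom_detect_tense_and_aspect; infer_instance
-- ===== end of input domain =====

-- B replaces A's state-threading loop by three independent passes: a backward early-exit
-- search for tense, a membership test for aspect, and a filter for cleaned signs; objective: simpler.

-- ===== PORT A =====
def pvMarkersA : List (String × List String) :=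
  [("past", ["YESTERDAY", "BEFORE", "PAST", "FINISH", "DONE"]),
   ("future", ["TOMORROW", "WILL", "FUTURE", "LATER"]),
   ("present", ["NOW", "TODAY"])]

-- inner `for tense_type, markers in …` loop with its `break`; returns (tense, aspect, is_temporal)
def pvInnerA : List (String × List String) → String → String → String → Bool → String × String × Bool
  | [], _, tense, aspect, isTemp => (tense, aspect, isTemp)
  | (tt, markers) :: rest, sign, tense, aspect, isTemp =>
    if markers.contains sign then
      let aspect' := if sign == "FINISH" then "perfect" else aspect
      if !(["NOW", "TODAY"].contains sign) then (tt, aspect', true)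
      else pvInnerA rest sign tt aspect' true
    else pvInnerA rest sign tense aspect isTemp

def pvLoopA : List String → String → String → List String → String × String × List String
  | [], tense, aspect, cleaned => (tense, aspect, cleaned)
  | sign :: rest, tense, aspect, cleaned =>
    let r := pvInnerA pvMarkersA sign tense aspect false
    let cleaned' := if !r.2.2 || ["NOW", "TODAY"].contains sign then cleaned ++ [sign] else cleaned
    pvLoopA rest r.1 r.2.1 cleaned'

def detect_tense_and_aspect (signs : List String) : String × String × List String :=
  pvLoopA signs "present" "simple" []

-- ===== PORT B =====
def pvTensesB : List (String × List String) :=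
  [("past", ["YESTERDAY", "BEFORE", "PAST", "FINISH", "DONE"]),
   ("future", ["TOMORROW", "WILL", "FUTURE", "LATER"]),
   ("present", ["NOW", "TODAY"])]

-- every marker except the present ones
def pvRemoval : List String :=
  ["YESTERDAY", "BEFORE", "PAST", "FINISH", "DONE", "TOMORROW", "WILL", "FUTURE", "LATER"]

-- inner category scan of `_last_tense`: first category whose marker list contains s
def pvCatB : List (String × List String) → String → Option String
  | [], _ => none
  | (t, ms) :: rest, s => if ms.contains s then some t else pvCatB rest s

-- `_last_tense`: backward search (applied to the reversed list) with early return
def pvLastTense : List String → String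
  | [] => "present"
  | s :: rest =>
    match pvCatB pvTensesB s with
    | some t => t
    | none => pvLastTense rest

def detect_tense_and_aspect_alt (signs : List String) : String × String × List String :=
  let tense := pvLastTense signs.reverse
  let aspect := if signs.contains "FINISH" then "perfect" else "simple"
  let cleaned := signs.filter (fun s => !(pvRemoval.contains s))
  (tense, aspect, cleaned)

-- ===== PRECONDITION & SPEC =====
def Spec_detect_tense_and_aspect (signs : List String) (out : String × String × List String) : Prop := out = detect_tense_and_aspect_alt signs
instance (signs : List String) (out : String × String × List String) : Decidable (Spec_detect_tense_and_aspect signs out) := by unfold Spec_detect_tense_and_aspect; infer_instance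

-- ===== CLAIM (what is proved, stated in full; the proofs are below) =====
def Claim_equal_detect_tense_and_aspect : Prop := ∀ (signs : List String), Dom_detect_tense_and_aspect signs → Spec_detect_tense_and_aspect signs (detect_tense_and_aspect signs)

-- ===== LEMMAS AND PROOFS =====

-- A's inner loop, characterised: new tense = first matching category (or old tense),
-- aspect flips on FINISH, is_temporal iff the sign is any marker.
theorem pvInnerA_eval (s tense aspect : String) :
    pvInnerA pvMarkersA s tense aspect false =
      ((pvCatB pvTensesB s).getD tense,
       (if s == "FINISH" then "perfect" else aspect),
       (pvRemoval.contains s || ["NOW", "TODAY"].contains s)) := by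
  by_cases h1 : s = "YESTERDAY"
  · subst h1; simp [pvInnerA, pvMarkersA, pvCatB, pvTensesB, pvRemoval]
  by_cases h2 : s = "BEFORE"
  · subst h2; simp [pvInnerA, pvMarkersA, pvCatB, pvTensesB, pvRemoval]
  by_cases h3 : s = "PAST"
  · subst h3; simp [pvInnerA, pvMarkersA, pvCatB, pvTensesB, pvRemoval]
  by_cases h4 : s = "FINISH"
  · subst h4; simp [pvInnerA, pvMarkersA, pvCatB, pvTensesB, pvRemoval]
  by_cases h5 : s = "DONE"
  · subst h5; simp [pvInnerA, pvMarkersA, pvCatB, pvTensesB, pvRemoval]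
  by_cases h6 : s = "TOMORROW"
  · subst h6; simp [pvInnerA, pvMarkersA, pvCatB, pvTensesB, pvRemoval]
  by_cases h7 : s = "WILL"
  · subst h7; simp [pvInnerA, pvMarkersA, pvCatB, pvTensesB, pvRemoval]
  by_cases h8 : s = "FUTURE"
  · subst h8; simp [pvInnerA, pvMarkersA, pvCatB, pvTensesB, pvRemoval]
  by_cases h9 : s = "LATER"
  · subst h9; simp [pvInnerA, pvMarkersA, pvCatB, pvTensesB, pvRemoval]
  by_cases h10 : s = "NOW"
  · subst h10; simp [pvInnerA, pvMarkersA, pvCatB, pvTensesB, pvRemoval]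
  by_cases h11 : s = "TODAY"
  · subst h11; simp [pvInnerA, pvMarkersA, pvCatB, pvTensesB, pvRemoval]
  simp [pvInnerA, pvMarkersA, pvCatB, pvTensesB, pvRemoval,
        h1, h2, h3, h4, h5, h6, h7, h8, h9, h10, h11,
        Ne.symm h1, Ne.symm h2, Ne.symm h3, Ne.symm h4, Ne.symm h5, Ne.symm h6,
        Ne.symm h7, Ne.symm h8, Ne.symm h9, Ne.symm h10, Ne.symm h11]

-- the backward search with an arbitrary default (proof-side generalisation of pvLastTense)
def pvAuxTense : List String → String → String
  | [], t => t
  | s :: rest, t =>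
    match pvCatB pvTensesB s with
    | some c => c
    | none => pvAuxTense rest t

theorem pvAuxTense_append (ys : List String) (s : String) (t : String) :
    pvAuxTense (ys ++ [s]) t = pvAuxTense ys ((pvCatB pvTensesB s).getD t) := by
  induction ys with
  | nil => cases h : pvCatB pvTensesB s <;> simp [pvAuxTense, h]
  | cons y ys ih => cases h : pvCatB pvTensesB y <;> simp [pvAuxTense, h, ih]

theorem pvLastTense_eq_aux (xs : List String) : pvLastTense xs = pvAuxTense xs "present" := by
  induction xs with
  | nil => rfl
  | cons s rest ih => cases h : pvCatB pvTensesB s <;> simp [pvLastTense, pvAuxTense, h, ih]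

-- A's tense fold equals the backward search over the reversed list
theorem foldl_eq_aux_reverse (xs : List String) :
    ∀ t : String,
      xs.foldl (fun t s => (pvCatB pvTensesB s).getD t) t = pvAuxTense xs.reverse t := by
  induction xs with
  | nil => intro t; rfl
  | cons s rest ih =>
    intro t
    simp only [List.foldl_cons, List.reverse_cons]
    rw [ih, pvAuxTense_append]

-- A's outer loop equals B's three passes, for any accumulator state.
theorem pvLoopA_eval (signs : List String) :
    ∀ (tense aspect : String) (cleaned : List String),
      pvLoopA signs tense aspect cleaned =
        (signs.foldl (fun t s => (pvCatB pvTensesB s).getD t) tense,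
         (if signs.contains "FINISH" then "perfect" else aspect),
         cleaned ++ signs.filter (fun s => !(pvRemoval.contains s))) := by
  induction signs with
  | nil => intro tense aspect cleaned; simp [pvLoopA]
  | cons s rest ih =>
    intro tense aspect cleaned
    rw [pvLoopA, pvInnerA_eval]
    rw [ih]
    by_cases hs : s ∈ pvRemoval
    · have hnt : s ≠ "NOW" ∧ s ≠ "TODAY" := by
        fin_cases hs <;> exact ⟨by decide, by decide⟩
      by_cases hf : s = "FINISH"
      · subst hf; simp [hs]
      · simp [hs, hf, hnt.1, hnt.2, Ne.symm hf]
    · have hf : s ≠ "FINISH" := by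
        intro h; exact hs (by rw [h]; decide)
      simp [hs, hf, Ne.symm hf]
      rw [if_pos (by tauto)]
      simp

-- ===== VERDICT (by name: the statement is the Claim_ definition above) =====
theorem detect_tense_and_aspect_spec : Claim_equal_detect_tense_and_aspect := by
  intro signs _
  unfold Spec_detect_tense_and_aspect detect_tense_and_aspect detect_tense_and_aspect_alt
  rw [pvLoopA_eval, pvLastTense_eq_aux, ← foldl_eq_aux_reverse]
  simp
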